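-- pv_equiv track=rewrite | github.com/wzygxr/shuati | class114_KMP_Algorithm/Code10_Codeforces126B_Password.py | find_password
-- ===== SOURCE A (Python) =====
-- def build_next_array(s):
--     """
--     构建KMP算法的next数组（部分匹配表）
--
--     next[i]表示s[0...i]子串的最长相等前后缀的长度
--
--     :param s: 输入字符串
--     :return: next数组
--     """
--     length = len(s)
--     next_array = [0] * length
--
--     # 初始化
--     next_array[0] = 0
--     prefix_len = 0  # 当前最长相等前后缀的长度
--     i = 1  # 当前处理的位置
--
--     # 从位置1开始处理
--     while i < length:
--         # 如果当前字符匹配，可以延长相等前后缀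
--         if s[i] == s[prefix_len]:
--             prefix_len += 1
--             next_array[i] = prefix_len
--             i += 1
--         # 如果不匹配且前缀长度大于0，需要回退
--         elif prefix_len > 0:
--             prefix_len = next_array[prefix_len - 1]
--         # 如果不匹配且前缀长度为0，next[i] = 0
--         else:
--             next_array[i] = 0
--             i += 1
--
--     return next_array
--
-- def is_substring_present(s, length, next_array):
--     """
--     检查指定长度的前缀是否在字符串中间出现过
--
--     :param s: 字符串
--     :param length: 子串长度
--     :param next_array: next数组
--     :return: 是否在中间出现过
--     """
--     # 在next数组中查找是否有等于length的值（除了最后一个位置）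
--     for i in range(len(s) - 1):
--         if next_array[i] == length:
--             return True
--     return False
--
-- def find_password(s):
--     """
--     找到符合条件的最长子串
--
--     :param s: 输入字符串
--     :return: 符合条件的最长子串，如果不存在则返回"Just a legend"
--     """
--     # 边界条件处理
--     if len(s) <= 2:
--         return "Just a legend"
--
--     # 构建next数组
--     next_array = build_next_array(s)
--
--     # 从最长的候选子串开始检查
--     candidate_length = next_array[len(s) - 1]
--
--     # 检查是否有符合条件的子串
--     while candidate_length > 0:
--         # 检查这个长度的子串是否在中间出现过
--         if is_substring_present(s, candidate_length, next_array):
--             return s[:candidate_length]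
--         # 尝试更短的候选子串
--         candidate_length = next_array[candidate_length - 1]
--
--     return "Just a legend"
-- ===== SOURCE B (Python) =====
-- def find_password(s):
--     # Direct definition: scan candidate lengths from longest down, testing
--     # "prefix == suffix" and "prefix occurs inside s[1:-1]" with slice
--     # comparison and substring search -- no prefix-function/KMP machinery.
--     n = len(s)
--     if n <= 2:
--         return "Just a legend"
--     interior = s[1:n - 1]
--     for L in range(n - 1, 0, -1):
--         p = s[:L]
--         if p == s[n - L:] and p in interior:
--             return p
--     return "Just a legend"
-- ===== Notes on version B (the rewrite author's own statement) =====
-- stated objective: simpler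
-- what changed: B drops the KMP prefix-function machinery entirely: it scans candidate lengths from longest down and tests each directly with a slice comparison (prefix == suffix) and a substring search in s[1:-1], i.e. it implements the problem's definition instead of A's next-array construction and border-chain walk.
import Mathlib
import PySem

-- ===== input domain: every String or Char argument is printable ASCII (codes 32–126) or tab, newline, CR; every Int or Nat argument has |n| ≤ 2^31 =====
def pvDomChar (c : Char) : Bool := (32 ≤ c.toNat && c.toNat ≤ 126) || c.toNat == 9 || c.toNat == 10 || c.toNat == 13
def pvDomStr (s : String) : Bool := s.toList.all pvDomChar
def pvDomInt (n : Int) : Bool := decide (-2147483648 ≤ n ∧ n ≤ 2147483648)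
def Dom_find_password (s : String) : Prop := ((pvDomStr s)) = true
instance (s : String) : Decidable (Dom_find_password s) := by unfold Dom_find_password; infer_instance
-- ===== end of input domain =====

-- B discards A's KMP next-array machinery and implements the problem's definition directly:
-- scan candidate lengths downward, testing prefix = suffix and occurrence inside s[1:-1].

-- ===== PORT A =====
-- All integers in the Python are provably nonnegative array indices/lengths, so Nat is exact here.
-- The fuel argument is only a totality guard for Python's while-loop (the loop provably
-- terminates; fuel 2*len suffices, as the proofs below establish).
def pwABuild (cs : List Char) : Nat → Nat → Nat → List Nat → List Nat
  | 0, _, _, arr => arr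
  | fuel+1, i, plen, arr =>
    if i < cs.length then
      if cs.getD i ' ' == cs.getD plen ' ' then
        pwABuild cs fuel (i+1) (plen+1) (arr.set i (plen+1))
      else if 0 < plen then
        pwABuild cs fuel i (arr.getD (plen-1) 0) arr
      else
        pwABuild cs fuel (i+1) plen (arr.set i 0)
    else arr

def buildNextArray (cs : List Char) : List Nat :=
  pwABuild cs (2 * cs.length) 1 0 ((List.replicate cs.length 0).set 0 0)

-- Python's early-returning for-loop over range(len(s)-1) is List.any over List.range.
def isSubstringPresent (cs : List Char) (len : Nat) (arr : List Nat) : Bool :=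
  (List.range (cs.length - 1)).any (fun i => arr.getD i 0 == len)

-- A's candidate while-loop; fuel cand+1 suffices since the candidate strictly decreases.
def pwASearch (cs : List Char) (arr : List Nat) : Nat → Nat → String
  | 0, _ => "Just a legend"
  | fuel+1, cand =>
    if 0 < cand then
      if isSubstringPresent cs cand arr then String.ofList (cs.take cand)   -- s[:cand], cand ≥ 0
      else pwASearch cs arr fuel (arr.getD (cand-1) 0)
    else "Just a legend"

def find_password (s : String) : String :=
  let cs := s.toList
  if cs.length ≤ 2 then "Just a legend"
  else
    let arr := buildNextArray cs
    let cand := arr.getD (cs.length - 1) 0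
    pwASearch cs arr (cand+1) cand

-- ===== PORT B =====
-- Python's 'sub in t' substring test, ported as the naive scan; exact: when sub is longer
-- than t the Nat-truncated range bound only adds checks that fail, matching Python's False.
def pySubstr (sub t : List Char) : Bool :=
  (List.range (t.length - sub.length + 1)).any (fun j => (t.drop j).take sub.length == sub)

-- Source B's for-loop over L in range(n-1, 0, -1), as structural recursion on L.
def pwScan (cs inter : List Char) : Nat → String
  | 0 => "Just a legend"
  | L+1 =>
    if (cs.take (L+1) == cs.drop (cs.length - (L+1))) && pySubstr (cs.take (L+1)) inter
    then String.ofList (cs.take (L+1))     -- p = s[:L]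
    else pwScan cs inter L

def find_password_alt (s : String) : String :=
  let cs := s.toList
  let n := cs.length
  if n ≤ 2 then "Just a legend"
  else pwScan cs ((cs.drop 1).take (n-2)) (n-1)   -- interior = s[1:n-1]

-- ===== PRECONDITION & SPEC =====
def Spec_find_password (s : String) (out : String) : Prop := out = find_password_alt s
instance (s : String) (out : String) : Decidable (Spec_find_password s out) := by unfold Spec_find_password; infer_instance

-- ===== CLAIM (what is proved, stated in full; the proofs are below) =====
def Claim_equal_find_password : Prop := ∀ (s : String), Dom_find_password s → Spec_find_password s (find_password s)

-- ===== LEMMAS AND PROOFS =====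

-- ---------- A-side loop machinery: simulate the flattened while-loop by a nested build ----------

-- Inner fallback loop of the standard nested formulation; fuel k suffices (k strictly decreases).
def pwKReduce (cs : List Char) (arr : List Nat) (i : Nat) : Nat → Nat → Nat
  | 0, k => k
  | fuel+1, k =>
    if 0 < k ∧ cs.getD i ' ' ≠ cs.getD k ' ' then pwKReduce cs arr i fuel (arr.getD (k-1) 0)
    else k

-- Nested formulation of A's build loop: one step per index i.
def pwKBuild (cs : List Char) (i k : Nat) (arr : List Nat) : List Nat :=
  if h : i < cs.length then
    let k1 := pwKReduce cs arr i k k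
    let k2 := if cs.getD i ' ' == cs.getD k1 ' ' then k1 + 1 else k1
    pwKBuild cs (i+1) k2 (arr.set i k2)
  else arr
termination_by cs.length - i

-- Invariant: every entry of the prefix array is at most its index.
def pwInv (arr : List Nat) : Prop := ∀ j, arr.getD j 0 ≤ j

theorem pwInv_replicate (n : Nat) : pwInv (List.replicate n 0) := by
  intro j
  by_cases h : j < n
  · simp [List.getD, h]
  · simp [List.getD, h]

theorem pwInv_set {arr : List Nat} (h : pwInv arr) {i v : Nat} (hv : v ≤ i) :
    pwInv (arr.set i v) := by
  intro j
  by_cases hij : j = i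
  · subst hij
    by_cases hlen : j < arr.length
    · simp [List.getD, List.getElem?_set_self hlen]; omega
    · have hnone : (arr.set j v)[j]? = none := by
        rw [List.getElem?_eq_none_iff]; simpa using (by omega : arr.length ≤ j)
      simp [List.getD, hnone]
  · have heq : (arr.set i v)[j]? = arr[j]? := List.getElem?_set_ne (by omega)
    simpa [List.getD, heq] using h j

-- Fuel irrelevance for the inner fallback loop: any fuel ≥ k computes the canonical value.
theorem pwKReduce_fuel (cs : List Char) (arr : List Nat) (i : Nat) (hInv : pwInv arr) :
    ∀ k f, k ≤ f → pwKReduce cs arr i f k = pwKReduce cs arr i k k := by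
  intro k
  induction k using Nat.strong_induction_on with
  | _ k ih =>
    intro f hf
    match k, f with
    | 0, 0 => rfl
    | 0, f+1 => simp [pwKReduce]
    | k+1, f+1 =>
      simp only [pwKReduce, Nat.add_sub_cancel]
      split
      · rename_i hcond
        have hle : arr.getD k 0 ≤ k := hInv k
        rw [ih (arr.getD k 0) (by omega) f (by omega), ih (arr.getD k 0) (by omega) k hle]
      · rfl

theorem pwKReduce_step (cs : List Char) (arr : List Nat) (i k : Nat) (hInv : pwInv arr)
    (hk : 0 < k) (hne : cs.getD i ' ' ≠ cs.getD k ' ') :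
    pwKReduce cs arr i k k = pwKReduce cs arr i (arr.getD (k-1) 0) (arr.getD (k-1) 0) := by
  obtain ⟨k', rfl⟩ : ∃ k', k = k' + 1 := ⟨k - 1, by omega⟩
  have h1 : pwKReduce cs arr i (k'+1) (k'+1) = pwKReduce cs arr i k' (arr.getD k' 0) := by
    simp only [pwKReduce, Nat.add_sub_cancel]
    rw [if_pos ⟨Nat.succ_pos k', hne⟩]
  rw [h1, Nat.add_sub_cancel]
  exact pwKReduce_fuel cs arr i hInv _ _ (hInv k')

theorem pwKReduce_exit (cs : List Char) (arr : List Nat) (i k : Nat)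
    (h : ¬ (0 < k ∧ cs.getD i ' ' ≠ cs.getD k ' ')) :
    pwKReduce cs arr i k k = k := by
  cases k with
  | zero => rfl
  | succ k => simp only [pwKReduce]; rw [if_neg h]

-- The nested build depends on the incoming k only through the canonical reduced value.
theorem pwKBuild_congr (cs : List Char) (i k k' : Nat) (arr : List Nat)
    (h : pwKReduce cs arr i k k = pwKReduce cs arr i k' k') :
    pwKBuild cs i k arr = pwKBuild cs i k' arr := by
  rw [pwKBuild.eq_def, h]
  conv_rhs => rw [pwKBuild.eq_def]

-- Core simulation: A's flattened while-loop equals the nested build, given enough fuel.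
theorem pwBuild_sim (cs : List Char) :
    ∀ f i k arr, pwInv arr → k < i → 2 * (cs.length - i) + k ≤ f →
      pwABuild cs f i k arr = pwKBuild cs i k arr := by
  intro f
  induction f with
  | zero =>
    intro i k arr _ _ hf
    have hi : ¬ i < cs.length := by omega
    rw [pwABuild, pwKBuild.eq_def, dif_neg hi]
  | succ f ih =>
    intro i k arr hInv hk hf
    by_cases hi : i < cs.length
    · rw [pwABuild, if_pos hi]
      by_cases hmatch : cs.getD i ' ' == cs.getD k ' '
      · rw [if_pos hmatch]
        have hred : pwKReduce cs arr i k k = k :=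
          pwKReduce_exit cs arr i k (by simp at hmatch; simp [hmatch])
        rw [ih (i+1) (k+1) _ (pwInv_set hInv (by omega)) (by omega) (by omega)]
        have hm' : cs[i]?.getD ' ' = cs[k]?.getD ' ' := by simpa [List.getD] using hmatch
        conv_rhs => rw [pwKBuild.eq_def]
        simp [dif_pos hi, hred, hm']
      · rw [if_neg hmatch]
        by_cases hkpos : 0 < k
        · rw [if_pos hkpos]
          have hne : cs.getD i ' ' ≠ cs.getD k ' ' := by simpa using hmatch
          have hk'lt : arr.getD (k-1) 0 < k := by have := hInv (k-1); omega
          rw [ih i (arr.getD (k-1) 0) arr hInv (by omega) (by omega)]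
          exact pwKBuild_congr cs i (arr.getD (k-1) 0) k arr
            (pwKReduce_step cs arr i k hInv hkpos hne).symm
        · rw [if_neg hkpos]
          have hk0 : k = 0 := by omega
          subst hk0
          rw [ih (i+1) 0 _ (pwInv_set hInv (by omega)) (by omega) (by omega)]
          have hm' : ¬ cs[i]?.getD ' ' = cs[0]?.getD ' ' := by simpa [List.getD] using hmatch
          conv_rhs => rw [pwKBuild.eq_def]
          simp [dif_pos hi, hm', show pwKReduce cs arr i 0 0 = 0 from rfl]
    · rw [pwABuild, if_neg hi, pwKBuild.eq_def, dif_neg hi]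

theorem pwArr_eq (cs : List Char) (h2 : 2 < cs.length) :
    buildNextArray cs = pwKBuild cs 1 0 (List.replicate cs.length 0) := by
  have hset : (List.replicate cs.length 0).set 0 0 = List.replicate cs.length (0:Nat) := by
    cases h : cs.length with
    | zero => simp
    | succ m => simp [List.replicate_succ]
  rw [buildNextArray, hset]
  exact pwBuild_sim cs (2*cs.length) 1 0 _ (pwInv_replicate _) (by omega) (by omega)

-- ---------- Borders and the prefix function, mathematically ----------

-- k is a proper border length of the length-m prefix of cs.
def pwBdB (cs : List Char) (m k : Nat) : Bool :=
  decide (k < m) && decide (cs.take k <:+ cs.take m)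

-- The prefix function: longest proper border of the length-m prefix.
def pwPi (cs : List Char) (m : Nat) : Nat :=
  Nat.findGreatest (fun k => pwBdB cs m k = true) (m - 1)

theorem pwBd_iff (cs : List Char) (m k : Nat) :
    pwBdB cs m k = true ↔ k < m ∧ cs.take k <:+ cs.take m := by
  simp [pwBdB]

theorem pwBd_zero (cs : List Char) (m : Nat) (h : 0 < m) : pwBdB cs m 0 = true := by
  simp [pwBdB, h]

theorem pwPi_le (cs : List Char) (m : Nat) : pwPi cs m ≤ m - 1 :=
  Nat.findGreatest_le _

theorem pwPi_bd (cs : List Char) (m : Nat) (h : 0 < m) : pwBdB cs m (pwPi cs m) = true := by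
  unfold pwPi
  exact Nat.findGreatest_spec (P := fun k => pwBdB cs m k = true) (Nat.zero_le _)
    (pwBd_zero cs m h)

theorem pwPi_max (cs : List Char) (m k : Nat) (h : pwBdB cs m k = true) : k ≤ pwPi cs m := by
  have hk : k < m := ((pwBd_iff cs m k).mp h).1
  unfold pwPi
  exact Nat.le_findGreatest (by omega) h

theorem pwPi_one (cs : List Char) : pwPi cs 1 = 0 := by
  simp [pwPi]

-- A border of a border is a border (suffix transitivity).
theorem pwBd_trans (cs : List Char) {m k j : Nat}
    (hk : pwBdB cs m k = true) (hj : pwBdB cs k j = true) : pwBdB cs m j = true := by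
  obtain ⟨hk1, hk2⟩ := (pwBd_iff cs m k).mp hk
  obtain ⟨hj1, hj2⟩ := (pwBd_iff cs k j).mp hj
  exact (pwBd_iff cs m j).mpr ⟨by omega, hj2.trans hk2⟩

-- A shorter border is a border of a longer border.
theorem pwBd_shrink (cs : List Char) {m k j : Nat} (hm : m ≤ cs.length)
    (hk : pwBdB cs m k = true) (hj : pwBdB cs m j = true) (hjk : j < k) :
    pwBdB cs k j = true := by
  obtain ⟨hk1, hk2⟩ := (pwBd_iff cs m k).mp hk
  obtain ⟨hj1, hj2⟩ := (pwBd_iff cs m j).mp hj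
  refine (pwBd_iff cs k j).mpr ⟨hjk, ?_⟩
  refine (cs.take j).suffix_of_suffix_length_le hj2 hk2 ?_
  simp [List.length_take]
  omega

theorem pwTakeSucc (cs : List Char) (i : Nat) (h : i < cs.length) :
    cs.take (i+1) = (cs.take i).concat (cs.getD i ' ') := by
  rw [List.concat_eq_append, List.take_add_one, List.getElem?_eq_getElem h,
    List.getD_eq_getElem cs ' ' h]
  rfl

-- Border extension: (k+1) borders the (i+1)-prefix iff k borders the i-prefix and chars match.
theorem pwBd_ext (cs : List Char) {i k : Nat} (hi : i < cs.length) :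
    pwBdB cs (i+1) (k+1) = true ↔
      pwBdB cs i k = true ∧ cs.getD i ' ' = cs.getD k ' ' := by
  constructor
  · intro h
    obtain ⟨hlt, t, ht⟩ := (pwBd_iff cs (i+1) (k+1)).mp h
    have hki : k < i := by omega
    rw [pwTakeSucc cs i hi, pwTakeSucc cs k (by omega), List.concat_eq_append,
      List.concat_eq_append, ← List.append_assoc] at ht
    have := List.append_inj' ht (by simp)
    obtain ⟨h1, h2⟩ := this
    refine ⟨(pwBd_iff cs i k).mpr ⟨hki, ⟨t, h1⟩⟩, ?_⟩
    simpa using h2.symm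
  · rintro ⟨hb, hc⟩
    obtain ⟨hlt, t, ht⟩ := (pwBd_iff cs i k).mp hb
    refine (pwBd_iff cs (i+1) (k+1)).mpr ⟨by omega, ⟨t, ?_⟩⟩
    rw [pwTakeSucc cs i hi, pwTakeSucc cs k (by omega), List.concat_eq_append,
      List.concat_eq_append, ← List.append_assoc, ht, hc]

-- ---------- Correctness of the build: the array holds the prefix function ----------

theorem pwReduce_spec (cs : List Char) (arr : List Nat) (i : Nat) (hInv : pwInv arr)
    (hi1 : 1 ≤ i) (hin : i < cs.length)
    (harr : ∀ j, j < i → arr.getD j 0 = pwPi cs (j+1)) :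
    ∀ k, pwBdB cs i k = true →
      (∀ j, pwBdB cs i j = true → cs.getD i ' ' = cs.getD j ' ' → j ≤ k) →
      pwBdB cs i (pwKReduce cs arr i k k) = true ∧
      (pwKReduce cs arr i k k = 0 ∨
        cs.getD i ' ' = cs.getD (pwKReduce cs arr i k k) ' ') ∧
      (∀ j, pwBdB cs i j = true → cs.getD i ' ' = cs.getD j ' ' →
        j ≤ pwKReduce cs arr i k k) := by
  intro k
  induction k using Nat.strong_induction_on with
  | _ k ih =>
    intro hk hmax
    by_cases hc : 0 < k ∧ cs.getD i ' ' ≠ cs.getD k ' '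
    · rw [pwKReduce_step cs arr i k hInv hc.1 hc.2]
      have hklt : k < i := ((pwBd_iff cs i k).mp hk).1
      have hk'pi : arr.getD (k-1) 0 = pwPi cs k := by
        have := harr (k-1) (by omega)
        rwa [Nat.sub_add_cancel hc.1] at this
      have hbk' : pwBdB cs i (arr.getD (k-1) 0) = true := by
        rw [hk'pi]; exact pwBd_trans cs hk (pwPi_bd cs k hc.1)
      have hlt' : arr.getD (k-1) 0 < k := by
        rw [hk'pi]; have := pwPi_le cs k; omega
      refine ih _ hlt' hbk' ?_
      intro j hbj hcj
      have hjk : j ≤ k := hmax j hbj hcj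
      have hne : j ≠ k := fun e => hc.2 (e ▸ hcj)
      have hjlt : j < k := by omega
      have : pwBdB cs k j = true :=
        pwBd_shrink cs (by omega) hk hbj hjlt
      rw [hk'pi]
      exact pwPi_max cs k j this
    · rw [pwKReduce_exit cs arr i k hc]
      refine ⟨hk, ?_, hmax⟩
      rcases Nat.eq_zero_or_pos k with h0 | hp
      · exact Or.inl h0
      · right; by_contra hne; exact hc ⟨hp, hne⟩

theorem pwStep (cs : List Char) (arr : List Nat) (i : Nat) (hInv : pwInv arr)
    (hi1 : 1 ≤ i) (hin : i < cs.length)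
    (harr : ∀ j, j < i → arr.getD j 0 = pwPi cs (j+1)) :
    (if cs.getD i ' ' == cs.getD (pwKReduce cs arr i (pwPi cs i) (pwPi cs i)) ' '
     then pwKReduce cs arr i (pwPi cs i) (pwPi cs i) + 1
     else pwKReduce cs arr i (pwPi cs i) (pwPi cs i)) = pwPi cs (i+1) := by
  obtain ⟨hb1, hb2, hb3⟩ :=
    pwReduce_spec cs arr i hInv hi1 hin harr (pwPi cs i) (pwPi_bd cs i hi1)
      (fun j hb _ => pwPi_max cs i j hb)
  set k1 := pwKReduce cs arr i (pwPi cs i) (pwPi cs i) with hk1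
  by_cases hm : cs.getD i ' ' = cs.getD k1 ' '
  · rw [if_pos (by simpa using hm)]
    have hb2' : pwBdB cs (i+1) (k1+1) = true := (pwBd_ext cs hin).mpr ⟨hb1, hm⟩
    have hle1 : k1 + 1 ≤ pwPi cs (i+1) := pwPi_max cs (i+1) (k1+1) hb2'
    have hle2 : pwPi cs (i+1) ≤ k1 + 1 := by
      have hbp : pwBdB cs (i+1) (pwPi cs (i+1)) = true := pwPi_bd cs (i+1) (by omega)
      cases hp : pwPi cs (i+1) with
      | zero => omega
      | succ q =>
        rw [hp] at hbp
        obtain ⟨hq1, hq2⟩ := (pwBd_ext cs hin).mp hbp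
        have := hb3 q hq1 hq2
        omega
    omega
  · rw [if_neg (by simpa using hm)]
    have hk10 : k1 = 0 := by
      rcases hb2 with h0 | hmm
      · exact h0
      · exact absurd hmm hm
    have : pwPi cs (i+1) = 0 := by
      by_contra hne
      have hbp : pwBdB cs (i+1) (pwPi cs (i+1)) = true := pwPi_bd cs (i+1) (by omega)
      cases hp : pwPi cs (i+1) with
      | zero => exact hne hp
      | succ q =>
        rw [hp] at hbp
        obtain ⟨hq1, hq2⟩ := (pwBd_ext cs hin).mp hbp
        have hq0 : q = 0 := by have := hb3 q hq1 hq2; omega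
        subst hq0
        rw [← hk10] at hq2
        exact hm hq2
    omega

theorem pwGetD_set_self (arr : List Nat) (i v : Nat) (h : i < arr.length) :
    (arr.set i v).getD i 0 = v := by
  simp [List.getD, List.getElem?_set_self h]

theorem pwGetD_set_ne (arr : List Nat) (i j v : Nat) (h : j ≠ i) :
    (arr.set i v).getD j 0 = arr.getD j 0 := by
  have heq : (arr.set i v)[j]? = arr[j]? := List.getElem?_set_ne (by omega)
  simp [List.getD, heq]

theorem pwBuild_pi (cs : List Char) :
    ∀ i k arr, 1 ≤ i → i ≤ cs.length → arr.length = cs.length → pwInv arr →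
      k = pwPi cs i →
      (∀ j, j < i → arr.getD j 0 = pwPi cs (j+1)) →
      ∀ j, j < cs.length → (pwKBuild cs i k arr).getD j 0 = pwPi cs (j+1) := by
  intro i
  induction' hn : cs.length - i using Nat.strong_induction_on with m ih generalizing i
  intro k arr hi1 hin hlen hInv hkpi harr j hj
  rw [pwKBuild]
  split
  · rename_i hlt
    subst hkpi
    have hstep := pwStep cs arr i hInv hi1 hlt harr
    set k1 := pwKReduce cs arr i (pwPi cs i) (pwPi cs i) with hk1def
    set k2 := if cs.getD i ' ' == cs.getD k1 ' ' then k1 + 1 else k1 with hk2def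
    have hk2 : k2 = pwPi cs (i+1) := hstep
    have hk2i : k2 ≤ i := by
      rw [hk2]; have := pwPi_le cs (i+1); omega
    refine ih (cs.length - (i+1)) (by omega) (i+1) rfl k2 (arr.set i k2) (by omega) (by omega)
      (by simpa using hlen) (pwInv_set hInv hk2i) hk2 ?_ j hj
    intro j' hj'
    rcases Nat.lt_or_ge j' i with hji | hji
    · rw [pwGetD_set_ne arr i j' k2 (by omega)]
      exact harr j' hji
    · have hji' : j' = i := by omega
      subst hji'
      rw [pwGetD_set_self arr j' k2 (by omega)]
      exact hk2
  · rename_i hge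
    exact harr j (by omega)

-- ---------- Occurrence in the interior, characterized via the prefix function ----------

def pwOcc (cs : List Char) (L : Nat) : Prop :=
  ∃ j, 1 ≤ j ∧ j + L ≤ cs.length - 1 ∧ (cs.drop j).take L = cs.take L

theorem pwOcc_to_bd (cs : List Char) {j L : Nat} (hj1 : 1 ≤ j)
    (heq : (cs.drop j).take L = cs.take L) :
    pwBdB cs (j + L) L = true := by
  refine (pwBd_iff cs (j+L) L).mpr ⟨by omega, ⟨cs.take j, ?_⟩⟩
  rw [← heq, ← List.take_add]

theorem pwBd_to_pi_exists (cs : List Char) (L : Nat) (hL : 1 ≤ L) :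
    ∀ m, m ≤ cs.length - 1 → pwBdB cs m L = true →
      ∃ i, i < cs.length - 1 ∧ pwPi cs (i+1) = L := by
  intro m
  induction m using Nat.strong_induction_on with
  | _ m ih =>
    intro hm hb
    have hLm : L < m := ((pwBd_iff cs m L).mp hb).1
    have hle : L ≤ pwPi cs m := pwPi_max cs m L hb
    by_cases he : pwPi cs m = L
    · exact ⟨m - 1, by omega, by rw [Nat.sub_add_cancel (by omega)]; exact he⟩
    · have hlt : L < pwPi cs m := by omega
      have hbpi : pwBdB cs m (pwPi cs m) = true := pwPi_bd cs m (by omega)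
      have hb' : pwBdB cs (pwPi cs m) L = true :=
        pwBd_shrink cs (by omega) hbpi hb hlt
      have hpm : pwPi cs m < m := by have := pwPi_le cs m; omega
      exact ih (pwPi cs m) hpm (by omega) hb'

theorem pwSuffix_eq_of_length {l₁ l₂ l : List Char} (h1 : l₁ <:+ l) (h2 : l₂ <:+ l)
    (hlen : l₁.length = l₂.length) : l₁ = l₂ := by
  have ha : l₁ <:+ l₂ := l₁.suffix_of_suffix_length_le h1 h2 (by omega)
  exact List.IsSuffix.eq_of_length ha hlen

theorem pwPi_to_occ (cs : List Char) {i L : Nat} (hL : 1 ≤ L) (hi : i < cs.length - 1)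
    (he : pwPi cs (i+1) = L) : pwOcc cs L := by
  have hb : pwBdB cs (i+1) L = true := he ▸ pwPi_bd cs (i+1) (by omega)
  obtain ⟨hlt, hsuf⟩ := (pwBd_iff cs (i+1) L).mp hb
  refine ⟨i + 1 - L, by omega, by omega, ?_⟩
  have hdec : cs.take (i+1) = cs.take (i+1-L) ++ (cs.drop (i+1-L)).take L := by
    rw [← List.take_add]
    congr 1
    omega
  have hs2 : (cs.drop (i+1-L)).take L <:+ cs.take (i+1) := ⟨cs.take (i+1-L), hdec.symm⟩
  refine pwSuffix_eq_of_length hs2 hsuf ?_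
  simp [List.length_take, List.length_drop]
  omega

theorem pwOcc_iff (cs : List Char) (L : Nat) (h3 : 3 ≤ cs.length) (hL : 1 ≤ L) :
    pwOcc cs L ↔ ∃ i, i < cs.length - 1 ∧ pwPi cs (i+1) = L := by
  constructor
  · intro h
    obtain ⟨j, hj1, hjL, heq⟩ := h
    exact pwBd_to_pi_exists cs L hL (j + L) hjL (pwOcc_to_bd cs hj1 heq)
  · intro h
    obtain ⟨i, hi, he⟩ := h
    exact pwPi_to_occ cs hL hi he

-- ---------- Bridging A's present-check and B's substring test ----------

theorem pwPresent_iff (cs : List Char) (arrF : List Nat)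
    (harrF : ∀ j, j < cs.length → arrF.getD j 0 = pwPi cs (j+1)) (L : Nat) :
    isSubstringPresent cs L arrF = true ↔ ∃ i, i < cs.length - 1 ∧ pwPi cs (i+1) = L := by
  unfold isSubstringPresent
  simp only [List.any_eq_true, List.mem_range, beq_iff_eq]
  constructor
  · rintro ⟨i, hi, he⟩
    exact ⟨i, hi, by rw [← harrF i (by omega)]; exact he⟩
  · rintro ⟨i, hi, he⟩
    exact ⟨i, hi, by rw [harrF i (by omega)]; exact he⟩

theorem pwInterDropTake (cs : List Char) (j' L : Nat) (hle : j' + L ≤ cs.length - 2) :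
    (((cs.drop 1).take (cs.length - 2)).drop j').take L = (cs.drop (1 + j')).take L := by
  rw [List.drop_take, List.drop_drop, List.take_take]
  congr 1
  omega

theorem pwSubstr_iff (cs : List Char) (L : Nat) (h3 : 3 ≤ cs.length) (hL1 : 1 ≤ L)
    (hLn : L ≤ cs.length - 1) :
    pySubstr (cs.take L) ((cs.drop 1).take (cs.length - 2)) = true ↔ pwOcc cs L := by
  have hlen : (cs.take L).length = L := by simp [List.length_take]; omega
  have hilen : ((cs.drop 1).take (cs.length - 2)).length = cs.length - 2 := by
    simp [List.length_take, List.length_drop]; omega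
  unfold pySubstr
  rw [hlen, hilen]
  simp only [List.any_eq_true, List.mem_range, beq_iff_eq]
  constructor
  · rintro ⟨j', hj', heq⟩
    by_cases hc : L ≤ cs.length - 2
    · have hjle : j' + L ≤ cs.length - 2 := by omega
      rw [pwInterDropTake cs j' L hjle] at heq
      refine ⟨j' + 1, by omega, by omega, ?_⟩
      rw [Nat.add_comm 1 j'] at heq
      exact heq
    · -- L = cs.length - 1: the single scanned window is shorter than L, so no match
      exfalso
      have hj0 : j' = 0 := by omega
      subst hj0
      have hlena : ((((cs.drop 1).take (cs.length - 2)).drop 0).take L).length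
          = cs.length - 2 := by
        simp [List.length_take, List.length_drop]; omega
      have := congrArg List.length heq
      rw [hlena, hlen] at this
      omega
  · rintro ⟨j, hj1, hjL, heq⟩
    have hLc : L ≤ cs.length - 2 := by omega
    refine ⟨j - 1, by omega, ?_⟩
    rw [pwInterDropTake cs (j-1) L (by omega)]
    rw [show 1 + (j - 1) = j by omega]
    exact heq

-- ---------- The qualifying predicate and the greatest qualifying length ----------

def pwQB (cs : List Char) (L : Nat) : Bool :=
  pwBdB cs cs.length L &&
    ((List.range cs.length).any (fun j =>
      decide (1 ≤ j) && decide (j + L ≤ cs.length - 1) && ((cs.drop j).take L == cs.take L)))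

theorem pwQB_iff (cs : List Char) (L : Nat) (h1 : 1 ≤ cs.length) :
    pwQB cs L = true ↔ pwBdB cs cs.length L = true ∧ pwOcc cs L := by
  unfold pwQB
  rw [Bool.and_eq_true]
  constructor
  · rintro ⟨hb, hany⟩
    rw [List.any_eq_true] at hany
    obtain ⟨j, hjmem, hcond⟩ := hany
    rw [Bool.and_eq_true, Bool.and_eq_true] at hcond
    obtain ⟨⟨h1, h2⟩, h3⟩ := hcond
    exact ⟨hb, j, of_decide_eq_true h1, of_decide_eq_true h2, by rwa [beq_iff_eq] at h3⟩
  · rintro ⟨hb, hocc⟩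
    obtain ⟨j, hj1, hjL, heq⟩ := hocc
    refine ⟨hb, ?_⟩
    rw [List.any_eq_true]
    refine ⟨j, ?_, ?_⟩
    · rw [List.mem_range]; omega
    · rw [Bool.and_eq_true, Bool.and_eq_true]
      exact ⟨⟨decide_eq_true hj1, decide_eq_true hjL⟩, by rw [beq_iff_eq]; exact heq⟩

theorem pwFG_congr (p : Nat → Bool) :
    ∀ b a, a ≤ b → (∀ x, a < x → x ≤ b → p x = false) →
      Nat.findGreatest (fun x => p x = true) b = Nat.findGreatest (fun x => p x = true) a := by
  intro b
  induction b with
  | zero =>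
    intro a ha _
    have h0 : a = 0 := by omega
    subst h0
    rfl
  | succ b ih =>
    intro a ha h
    by_cases hab : a = b + 1
    · rw [hab]
    · have hab' : a ≤ b := by omega
      rw [Nat.findGreatest_succ]
      have hfalse : p (b+1) = false := h (b+1) (by omega) (by omega)
      simp only [hfalse, Bool.false_eq_true, if_false]
      exact ih a hab' (fun x hx1 hx2 => h x hx1 (by omega))

-- ---------- B's scan computes the greatest qualifying length ----------

theorem pwScan_spec (cs : List Char) (h3 : 3 ≤ cs.length) :
    ∀ L, L ≤ cs.length - 1 →
      pwScan cs ((cs.drop 1).take (cs.length - 2)) L =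
        (if 0 < Nat.findGreatest (fun x => pwQB cs x = true) L
         then String.ofList (cs.take (Nat.findGreatest (fun x => pwQB cs x = true) L))
         else "Just a legend") := by
  intro L
  induction L with
  | zero => intro _; simp [pwScan]
  | succ L ih =>
    intro hle
    have hcond :
        ((cs.take (L+1) == cs.drop (cs.length - (L+1)))
          && pySubstr (cs.take (L+1)) ((cs.drop 1).take (cs.length - 2))) = true
        ↔ pwQB cs (L+1) = true := by
      rw [Bool.and_eq_true, beq_iff_eq]
      rw [pwQB_iff cs (L+1) (by omega)]
      rw [pwSubstr_iff cs (L+1) h3 (by omega) hle]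
      constructor
      · rintro ⟨hb, ho⟩
        refine ⟨(pwBd_iff cs cs.length (L+1)).mpr ⟨by omega, ?_⟩, ho⟩
        rw [List.take_length]
        rw [List.suffix_iff_eq_drop]
        rw [show (cs.take (L+1)).length = L + 1 by simp [List.length_take]; omega]
        exact hb
      · rintro ⟨hb, ho⟩
        obtain ⟨hlt, hsuf⟩ := (pwBd_iff cs cs.length (L+1)).mp hb
        rw [List.take_length] at hsuf
        refine ⟨?_, ho⟩
        rw [List.suffix_iff_eq_drop] at hsuf
        rw [show (cs.take (L+1)).length = L + 1 by simp [List.length_take]; omega] at hsuf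
        exact hsuf
    rw [pwScan]
    rw [Nat.findGreatest_succ]
    by_cases hq : pwQB cs (L+1) = true
    · rw [if_pos (hcond.mpr hq)]
      simp only [hq, if_true]
      rw [if_pos (by omega)]
    · have : ¬ (((cs.take (L+1) == cs.drop (cs.length - (L+1)))
          && pySubstr (cs.take (L+1)) ((cs.drop 1).take (cs.length - 2))) = true) :=
        fun h => hq (hcond.mp h)
      rw [if_neg this]
      simp only [hq, if_false]
      exact ih (by omega)

-- ---------- A's search computes the greatest qualifying length ----------

theorem pwSearch_spec (cs : List Char) (arrF : List Nat) (h3 : 3 ≤ cs.length)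
    (harrF : ∀ j, j < cs.length → arrF.getD j 0 = pwPi cs (j+1)) :
    ∀ fuel c, c < fuel → c ≤ cs.length - 1 → pwBdB cs cs.length c = true →
      (∀ L, pwQB cs L = true → 1 ≤ L → L ≤ c) →
      pwASearch cs arrF fuel c =
        (if 0 < Nat.findGreatest (fun x => pwQB cs x = true) c
         then String.ofList (cs.take (Nat.findGreatest (fun x => pwQB cs x = true) c))
         else "Just a legend") := by
  intro fuel
  induction fuel with
  | zero => intro c hc; omega
  | succ fuel ih =>
    intro c hcf hcn hbd hmax
    by_cases hc : 0 < c
    · rw [pwASearch, if_pos hc]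
      by_cases hp : isSubstringPresent cs c arrF = true
      · have hocc : pwOcc cs c :=
          (pwOcc_iff cs c h3 hc).mpr ((pwPresent_iff cs arrF harrF c).mp hp)
        have hq : pwQB cs c = true := (pwQB_iff cs c (by omega)).mpr ⟨hbd, hocc⟩
        have hfg : Nat.findGreatest (fun x => pwQB cs x = true) c = c := by
          have h1 : c ≤ Nat.findGreatest (fun x => pwQB cs x = true) c :=
            Nat.le_findGreatest (Nat.le_refl c) hq
          have h2 := Nat.findGreatest_le (P := fun x => pwQB cs x = true) c
          omega
        rw [if_pos hp, hfg, if_pos hc]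
      · have hq : pwQB cs c = false := by
          cases hqq : pwQB cs c with
          | false => rfl
          | true =>
            exfalso
            have hocc : pwOcc cs c := ((pwQB_iff cs c (by omega)).mp hqq).2
            exact hp ((pwPresent_iff cs arrF harrF c).mpr ((pwOcc_iff cs c h3 hc).mp hocc))
        rw [if_neg hp]
        have hc' : arrF.getD (c-1) 0 = pwPi cs c := by
          have := harrF (c-1) (by omega)
          rwa [Nat.sub_add_cancel hc] at this
        have hc'le : arrF.getD (c-1) 0 ≤ c - 1 := by
          rw [hc']; have := pwPi_le cs c; omega
        have hbd' : pwBdB cs cs.length (arrF.getD (c-1) 0) = true := by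
          rw [hc']
          exact pwBd_trans cs hbd (pwPi_bd cs c hc)
        have hmax' : ∀ L, pwQB cs L = true → 1 ≤ L → L ≤ arrF.getD (c-1) 0 := by
          intro L hqL hL1
          have hLc : L ≤ c := hmax L hqL hL1
          have hne : L ≠ c := fun e => by rw [e] at hqL; rw [hqL] at hq; cases hq
          have hLlt : L < c := by omega
          have hbL : pwBdB cs cs.length L = true := ((pwQB_iff cs L (by omega)).mp hqL).1
          have : pwBdB cs c L = true :=
            pwBd_shrink cs (Nat.le_refl _) hbd hbL hLlt
          rw [hc']
          exact pwPi_max cs c L this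
        have hfg : Nat.findGreatest (fun x => pwQB cs x = true) c
            = Nat.findGreatest (fun x => pwQB cs x = true) (arrF.getD (c-1) 0) := by
          apply pwFG_congr
          · omega
          · intro x hx1 hx2
            cases hqx : pwQB cs x with
            | false => rfl
            | true =>
              exfalso
              have := hmax' x hqx (by omega)
              omega
        rw [hfg]
        exact ih (arrF.getD (c-1) 0) (by omega) (by omega) hbd' hmax'
    · have hc0 : c = 0 := by omega
      subst hc0
      rw [pwASearch, if_neg (by omega)]
      simp

-- ===== VERDICT (by name: the statement is the Claim_ definition above) =====
theorem find_password_spec : Claim_equal_find_password := by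
  intro s _
  unfold Spec_find_password find_password find_password_alt
  set cs := s.toList with hcs
  by_cases h2 : cs.length ≤ 2
  · simp [h2]
  · simp only [if_neg h2]
    have h3 : 3 ≤ cs.length := by omega
    have harr := pwArr_eq cs (by omega)
    rw [harr]
    have harrF : ∀ j, j < cs.length →
        (pwKBuild cs 1 0 (List.replicate cs.length 0)).getD j 0 = pwPi cs (j+1) := by
      apply pwBuild_pi cs 1 0 (List.replicate cs.length 0) (by omega) (by omega)
        (by simp) (pwInv_replicate _) (pwPi_one cs).symm
      intro j hj
      have hj0 : j = 0 := by omega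
      subst hj0
      rw [pwPi_one cs]
      simp [List.getD, List.getElem?_replicate, show 0 < cs.length by omega]
    set arrF := pwKBuild cs 1 0 (List.replicate cs.length 0) with harrFdef
    have hcand : arrF.getD (cs.length - 1) 0 = pwPi cs cs.length := by
      have := harrF (cs.length - 1) (by omega)
      rwa [Nat.sub_add_cancel (by omega)] at this
    rw [hcand]
    have hbdpi : pwBdB cs cs.length (pwPi cs cs.length) = true :=
      pwPi_bd cs cs.length (by omega)
    have hpile : pwPi cs cs.length ≤ cs.length - 1 := pwPi_le cs cs.length
    rw [pwSearch_spec cs arrF h3 harrF (pwPi cs cs.length + 1) (pwPi cs cs.length)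
      (by omega) hpile hbdpi
      (fun L hq _ => pwPi_max cs cs.length L ((pwQB_iff cs L (by omega)).mp hq).1)]
    rw [pwScan_spec cs h3 (cs.length - 1) (Nat.le_refl _)]
    have hfg : Nat.findGreatest (fun x => pwQB cs x = true) (cs.length - 1)
        = Nat.findGreatest (fun x => pwQB cs x = true) (pwPi cs cs.length) := by
      apply pwFG_congr
      · omega
      · intro x hx1 hx2
        cases hqx : pwQB cs x with
        | false => rfl
        | true =>
          exfalso
          have := pwPi_max cs cs.length x ((pwQB_iff cs x (by omega)).mp hqx).1
          omega
    rw [hfg]
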